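-- pv_equiv track=rewrite | github.com/lukacatipovic/actual-currents | backend/scripts/convert_to_zarr.py | hilbert_encode
-- ===== SOURCE A (Python) =====
-- def hilbert_encode(x, y, order=16):
--     """
--     Encode 2D coordinates into Hilbert curve index.
--
--     Hilbert curves provide better spatial locality than Morton codes by ensuring
--     that the curve never makes large jumps. The curve is continuous and fills space
--     more uniformly than Z-order curves.
--
--     Args:
--         x: X coordinate (integer, 0 to 2^order - 1)
--         y: Y coordinate (integer, 0 to 2^order - 1)
--         order: Order of Hilbert curve (grid size is 2^order x 2^order)
--
--     Returns:
--         Hilbert curve index (integer)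
--     """
--     # Hilbert curve distance calculation using rotation-based algorithm
--     d = 0
--     s = order - 1
--
--     while s >= 0:
--         rx = (x >> s) & 1
--         ry = (y >> s) & 1
--         d = (d << 2) | ((3 * rx) ^ ry)
--
--         # Rotate coordinates if needed
--         if ry == 0:
--             if rx == 1:
--                 x = (1 << order) - 1 - x
--                 y = (1 << order) - 1 - y
--             x, y = y, x
--
--         s -= 1
--
--     return d
-- ===== SOURCE B (Python) =====
-- def hilbert_encode(x, y, order=16):
--     """Hilbert index via a 4-state machine over the original bits: instead of
--     mutating/flipping the coordinates each level, track a swap/complement state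
--     and read bits of the untouched x, y (same result as A's rotation loop)."""
--     d = 0
--     swap = 0
--     comp = 0
--     for s in range(order - 1, -1, -1):
--         ax = (x >> s) & 1
--         ay = (y >> s) & 1
--         u, v = (ay, ax) if swap else (ax, ay)
--         rx = u ^ comp
--         ry = v ^ comp
--         d = (d << 2) | ((3 * rx) ^ ry)
--         if ry == 0:
--             swap ^= 1
--             comp ^= rx
--     return d
-- ===== Notes on version B (the rewrite author's own statement) =====
-- stated objective: alternative
-- what changed: B computes the Hilbert index with a 4-state swap/complement state machine that reads bits of the untouched input coordinates, instead of A's per-level mutation (mask-flip and swap) of the coordinates themselves.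
import Mathlib
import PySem

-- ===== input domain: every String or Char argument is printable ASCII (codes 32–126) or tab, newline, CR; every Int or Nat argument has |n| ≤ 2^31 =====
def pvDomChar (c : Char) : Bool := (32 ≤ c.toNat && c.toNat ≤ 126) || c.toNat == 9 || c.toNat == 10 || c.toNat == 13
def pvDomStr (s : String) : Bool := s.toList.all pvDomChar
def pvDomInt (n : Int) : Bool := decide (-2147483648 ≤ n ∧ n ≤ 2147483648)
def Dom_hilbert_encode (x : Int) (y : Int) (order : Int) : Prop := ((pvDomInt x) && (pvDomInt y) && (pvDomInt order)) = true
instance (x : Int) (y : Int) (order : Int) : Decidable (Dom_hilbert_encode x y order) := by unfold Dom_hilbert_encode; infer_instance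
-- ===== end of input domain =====

-- B replaces A's coordinate-mutating rotation loop by a 4-state (swap/complement)
-- machine reading bits of the untouched inputs (objective: alternative algorithm,
-- same cost); return values proved equal.

-- ===== PORT A =====
-- A's while loop, s running from order-1 down to 0; fuel = s+1, so fuel n+1 means s = n.
-- `1 << order` is ported as `1 <<< order.toNat` (exact: the flip branch only runs when order ≥ 1).
def hilbertLoopA (order : Int) : Nat → Int → Int → Int → Int
  | 0, _, _, d => d
  | n+1, x, y, d =>
      let rx := PySem.Int.band (x >>> n) 1
      let ry := PySem.Int.band (y >>> n) 1
      let d' := PySem.Int.bor (d <<< (2:Nat)) (PySem.Int.bxor (3*rx) ry)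
      let p : Int × Int :=
        if ry = 0 then
          if rx = 1 then ((1 <<< order.toNat) - 1 - y, (1 <<< order.toNat) - 1 - x)
          else (y, x)
        else (x, y)
      hilbertLoopA order n p.1 p.2 d'

def hilbert_encode (x : Int) (y : Int) (order : Int) : Int :=
  hilbertLoopA order order.toNat x y 0

-- ===== PORT B =====
-- B's for-loop over s = order-1 … 0 carrying the state (swap, comp); fuel = s+1.
def hilbertLoopB : Nat → Int → Int → Int → Int → Int → Int
  | 0, _, _, _, _, d => d
  | n+1, x, y, sw, cp, d =>
      let ax := PySem.Int.band (x >>> n) 1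
      let ay := PySem.Int.band (y >>> n) 1
      let u := if sw = 0 then ax else ay
      let v := if sw = 0 then ay else ax
      let rx := PySem.Int.bxor u cp
      let ry := PySem.Int.bxor v cp
      let d' := PySem.Int.bor (d <<< (2:Nat)) (PySem.Int.bxor (3*rx) ry)
      if ry = 0 then hilbertLoopB n x y (PySem.Int.bxor sw 1) (PySem.Int.bxor cp rx) d'
      else hilbertLoopB n x y sw cp d'

def hilbert_encode_alt (x : Int) (y : Int) (order : Int) : Int :=
  hilbertLoopB order.toNat x y 0 0 0

-- ===== PRECONDITION & SPEC =====
def Spec_hilbert_encode (x : Int) (y : Int) (order : Int) (out : Int) : Prop := out = hilbert_encode_alt x y order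
instance (x : Int) (y : Int) (order : Int) (out : Int) : Decidable (Spec_hilbert_encode x y order out) := by unfold Spec_hilbert_encode; infer_instance

-- ===== CLAIM (what is proved, stated in full; the proofs are below) =====
def Claim_equal_hilbert_encode : Prop := ∀ (x : Int) (y : Int) (order : Int), Dom_hilbert_encode x y order → Spec_hilbert_encode x y order (hilbert_encode x y order)

-- ===== LEMMAS AND PROOFS =====

-- apply the complement (with A's fixed mask) iff cp = 1: B's state as a coordinate transform
def gflip (order : Int) (cp t : Int) : Int :=
  if cp = 0 then t else (1 <<< order.toNat) - 1 - t

theorem band_one_cases (a : Int) : PySem.Int.band a 1 = 0 ∨ PySem.Int.band a 1 = 1 := by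
  rw [PySem.Int.band_one]
  have h1 := PySem.Int.mod_nonneg a (b := 2) (by omega)
  have h2 := PySem.Int.mod_lt a (b := 2) (by omega)
  omega

-- bit n of the masked complement 2^k - 1 - t is the flipped bit n of t, for n < k (any integer t)
theorem bitFlip {k n : Nat} (t : Int) (h : n < k) :
    PySem.Int.band ((((1:Int) <<< k) - 1 - t) >>> n) 1 = 1 - PySem.Int.band (t >>> n) 1 := by
  have h1k : ((1:Int) <<< k) = 2^k := by simp [Int.shiftLeft_eq]
  have hp : (0:Int) < 2^n := by positivity
  have hq := Int.ediv_add_emod t (2^n)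
  have hr0 : 0 ≤ t % 2^n := Int.emod_nonneg t (by positivity)
  have hr1 : t % 2^n < 2^n := Int.emod_lt_of_pos t hp
  have hk2 : (2:Int)^k = 2^(k-n) * 2^n := by rw [← pow_add]; congr 1; omega
  have heq : ((1:Int) <<< k) - 1 - t = (2^n - 1 - t % 2^n) + (2^(k-n) - 1 - t / 2^n) * 2^n := by
    rw [h1k, hk2]; linarith [hq]
  have hdiv : (((1:Int) <<< k) - 1 - t) >>> n = 2^(k-n) - 1 - t / 2^n := by
    rw [Int.shiftRight_eq_div_pow, heq]
    push_cast
    rw [Int.add_mul_ediv_right _ _ (by positivity : (2:Int)^n ≠ 0),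
        Int.ediv_eq_zero_of_lt (by omega) (by omega)]
    ring
  have hts : t >>> n = t / 2^n := by rw [Int.shiftRight_eq_div_pow]; push_cast; rfl
  rw [PySem.Int.band_one, PySem.Int.band_one, PySem.Int.mod_eq_emod_of_pos (by omega),
      PySem.Int.mod_eq_emod_of_pos (by omega), hdiv, hts]
  have h2 : (2:Int) ∣ 2^(k-n) := dvd_pow_self 2 (by omega)
  omega

-- main invariant: A's loop on the state-transformed coordinates equals B's loop on the originals
theorem loopAB (order : Int) : ∀ (n : Nat), n ≤ order.toNat →
    ∀ (x y sw cp d : Int), (sw = 0 ∨ sw = 1) → (cp = 0 ∨ cp = 1) →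
    hilbertLoopA order n (if sw = 0 then gflip order cp x else gflip order cp y)
                         (if sw = 0 then gflip order cp y else gflip order cp x) d
      = hilbertLoopB n x y sw cp d := by
  intro n
  induction n with
  | zero => intro _ x y sw cp d _ _; simp [hilbertLoopA, hilbertLoopB]
  | succ n ih =>
    intro hn x y sw cp d hsw hcp
    have hlt : n < order.toNat := hn
    have hfx := bitFlip x hlt
    have hfy := bitFlip y hlt
    have hle : n ≤ order.toNat := le_of_lt hlt
    rcases band_one_cases (x >>> n) with hbx | hbx <;>
    rcases band_one_cases (y >>> n) with hby | hby <;>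
    rcases hsw with rfl | rfl <;> rcases hcp with rfl | rfl <;>
      have e01 : PySem.Int.bxor 0 1 = 1 := by decide
    all_goals have e11 : PySem.Int.bxor 1 1 = 0 := by decide
    all_goals have e31 : PySem.Int.bxor 3 1 = 2 := by decide
    all_goals simp [hilbertLoopA, hilbertLoopB, gflip, hfx, hfy, hbx, hby, e01, e11, e31, ← ih hle, sub_sub_cancel]

-- ===== VERDICT (by name: the statement is the Claim_ definition above) =====
theorem hilbert_encode_spec : Claim_equal_hilbert_encode := by
  intro x y order _
  unfold Spec_hilbert_encode hilbert_encode hilbert_encode_alt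
  have h := loopAB order order.toNat le_rfl x y 0 0 0 (Or.inl rfl) (Or.inl rfl)
  simpa [gflip] using h
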